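-- pv_equiv track=rewrite | github.com/Titanmodne/3d-print-software | G0Trimmer.py | remove_continuous_g0
-- ===== SOURCE A (Python) =====
-- def remove_continuous_g0(data):
--     """移除连续的G0指令，仅保留最后一个G0"""
--     result = []
--     g0_lines = []  # 用于存储连续的G0指令
--     for line in data:
--         if line.startswith("G0"):
--             g0_lines.append(line)  # 收集连续的G0指令
--         else:
--             # 如果遇到非G0指令，先将最后一个G0指令（如果有）加入结果
--             if g0_lines:
--                 result.append(g0_lines[-1])  # 只保留最后一个G0
--                 g0_lines = []  # 重置G0列表
--             result.append(line)  # 添加非G0指令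
--     # 处理文件末尾的连续G0指令
--     if g0_lines:
--         result.append(g0_lines[-1])  # 只保留最后一个G0
--     return result
-- ===== SOURCE B (Python) =====
-- def remove_continuous_g0(data):
--     """移除连续的G0指令，仅保留最后一个G0"""
--     lines = list(data)
--     nexts = lines[1:] + [""]
--     return [a for a, b in zip(lines, nexts)
--             if not a.startswith("G0") or not b.startswith("G0")]
-- ===== Notes on version B (the rewrite author's own statement) =====
-- stated objective: simpler
-- what changed: Replaces A's stateful loop with a G0-accumulation buffer by a single stateless comprehension that keeps a line iff it is not G0 or its successor (with a sentinel '' at the end) is not G0.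
import Mathlib
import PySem

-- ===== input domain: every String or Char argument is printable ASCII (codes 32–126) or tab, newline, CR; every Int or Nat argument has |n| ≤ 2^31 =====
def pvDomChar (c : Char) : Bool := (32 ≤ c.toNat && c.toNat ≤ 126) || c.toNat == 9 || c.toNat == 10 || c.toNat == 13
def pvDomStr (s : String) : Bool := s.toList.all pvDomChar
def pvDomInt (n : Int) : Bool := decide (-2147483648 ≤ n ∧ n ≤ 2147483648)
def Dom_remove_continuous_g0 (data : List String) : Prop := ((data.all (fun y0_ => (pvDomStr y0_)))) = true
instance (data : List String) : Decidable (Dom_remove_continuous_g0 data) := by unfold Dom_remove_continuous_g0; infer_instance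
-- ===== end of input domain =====

-- B replaces A's stateful loop with a buffer by one stateless lookahead comprehension; same return value.
-- ===== PORT A =====
-- A's for-loop over data with state (result, g0_lines), as structural recursion on the remaining lines.
def removeG0Loop (result : List String) (g0_lines : List String) : List String → List String
  | [] =>
      -- 'if g0_lines: result.append(g0_lines[-1])' after the loop
      match g0_lines.getLast? with
      | some x => result ++ [x]
      | none => result
  | line :: rest =>
      if PySem.Str.startswith line "G0" then
        removeG0Loop result (g0_lines ++ [line]) rest
      else
        match g0_lines.getLast? with
        | some x => removeG0Loop (result ++ [x, line]) [] rest
        | none => removeG0Loop (result ++ [line]) [] rest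

def remove_continuous_g0 (data : List String) : List String :=
  removeG0Loop [] [] data

-- ===== PORT B =====
-- zip each line with its successor ('' past the end), keep unless both are G0 lines.
def remove_continuous_g0_alt (data : List String) : List String :=
  let lines := data
  let nexts := lines.drop 1 ++ [""]
  ((lines.zip nexts).filter
      (fun p => !(PySem.Str.startswith p.1 "G0") || !(PySem.Str.startswith p.2 "G0"))).map Prod.fst

-- ===== PRECONDITION & SPEC =====
def Spec_remove_continuous_g0 (data : List String) (out : List String) : Prop := out = remove_continuous_g0_alt data
instance (data : List String) (out : List String) : Decidable (Spec_remove_continuous_g0 data out) := by unfold Spec_remove_continuous_g0; infer_instance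

-- ===== CLAIM (what is proved, stated in full; the proofs are below) =====
def Claim_equal_remove_continuous_g0 : Prop := ∀ (data : List String), Dom_remove_continuous_g0 data → Spec_remove_continuous_g0 data (remove_continuous_g0 data)

-- ===== LEMMAS AND PROOFS =====

-- ===== VERDICT (by name: the statement is the Claim_ definition above) =====
-- head of the remaining input, '' at the end (the sentinel successor B pairs each line with)
def nextOf : List String → String
  | [] => ""
  | l :: _ => l

theorem startswith_nil_chars : PySem.Chars.startswith [] ['G', '0'] = false := by decide

theorem alt_nil : remove_continuous_g0_alt [] = [] := rfl

theorem alt_cons (l : String) (ls : List String) :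
    remove_continuous_g0_alt (l :: ls) =
      (if !(PySem.Str.startswith l "G0") || !(PySem.Str.startswith (nextOf ls) "G0")
        then [l] else []) ++ remove_continuous_g0_alt ls := by
  cases ls with
  | nil =>
      simp only [remove_continuous_g0_alt, nextOf, List.drop, List.nil_append,
        List.zip_cons_cons, List.zip_nil_left, List.filter_cons, List.filter_nil]
      split <;> simp_all
  | cons l' ls' =>
      simp only [remove_continuous_g0_alt, nextOf, List.drop, List.cons_append,
        List.zip_cons_cons, List.filter_cons]
      split <;> simp_all

-- the loop only ever reads g0_lines through its last element
theorem loop_last (ls : List String) (g0s : List String) (x : String) (res : List String) :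
    removeG0Loop res (g0s ++ [x]) ls = removeG0Loop res [x] ls := by
  induction ls generalizing g0s x res with
  | nil => simp [removeG0Loop]
  | cons l ls ih =>
      by_cases hG : PySem.Str.startswith l "G0"
      · simp only [removeG0Loop, hG, if_true]
        rw [ih (g0s ++ [x]) l res, ih [x] l res]
      · have hG' : PySem.Chars.startswith l.toList ['G', '0'] = false := by simpa using hG
        simp [removeG0Loop, hG']

-- the result accumulator comes out in front
theorem loop_res (ls : List String) (g0s res : List String) :
    removeG0Loop res g0s ls = res ++ removeG0Loop [] g0s ls := by
  induction ls generalizing g0s res with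
  | nil => cases h : g0s.getLast? <;> simp [removeG0Loop, h]
  | cons l ls ih =>
      by_cases hG : PySem.Str.startswith l "G0"
      · simp only [removeG0Loop, hG, if_true]
        exact ih _ _
      · cases h : g0s.getLast? with
        | none =>
            simp only [removeG0Loop, hG, h, if_false, Bool.false_eq_true, List.nil_append]
            rw [ih [] (res ++ [l]), ih [] [l]]
            simp
        | some y =>
            simp only [removeG0Loop, hG, h, if_false, Bool.false_eq_true, List.nil_append]
            rw [ih [] (res ++ [y, l]), ih [] [y, l]]
            simp

theorem loop_eq_alt (ls : List String) :
    removeG0Loop [] [] ls = remove_continuous_g0_alt ls ∧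
    ∀ x, removeG0Loop [] [x] ls =
      (if !(PySem.Str.startswith (nextOf ls) "G0") then [x] else []) ++ remove_continuous_g0_alt ls := by
  induction ls with
  | nil =>
      refine ⟨rfl, fun x => ?_⟩
      simp [removeG0Loop, nextOf, alt_nil, startswith_nil_chars]
  | cons l ls ih =>
      constructor
      · rw [alt_cons]
        by_cases hG : PySem.Str.startswith l "G0"
        · simp only [removeG0Loop, hG, if_true, List.nil_append]
          rw [ih.2 l]
          simp [hG, nextOf]
        · simp only [removeG0Loop, hG, if_false, Bool.false_eq_true, List.getLast?_nil,
            List.nil_append]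
          rw [loop_res, ih.1]
          simp [hG]
      · intro x
        rw [alt_cons]
        by_cases hG : PySem.Str.startswith l "G0"
        · simp only [removeG0Loop, hG, if_true]
          rw [show [x] ++ [l] = [x] ++ [l] from rfl, loop_last ls [x] l [], ih.2 l]
          have hG' : PySem.Chars.startswith l.toList ['G', '0'] = true := by simpa using hG
          simp [hG', nextOf]
        · simp only [removeG0Loop, hG, if_false, Bool.false_eq_true,
            List.getLast?_singleton, List.nil_append]
          rw [loop_res, ih.1]
          have hG' : PySem.Chars.startswith l.toList ['G', '0'] = false := by simpa using hG
          simp [hG', nextOf]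

theorem remove_continuous_g0_spec : Claim_equal_remove_continuous_g0 := by
  intro data _
  unfold Spec_remove_continuous_g0 remove_continuous_g0
  exact (loop_eq_alt data).1
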